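-- pv_equiv track=rewrite | github.com/dommolo/aoc2024 | 9/part2.py | extract_index
-- ===== SOURCE A (Python) =====
-- def extract_index(data):
--     idx = {}
--     id_ = 0
--     last = None
--     for n, c in enumerate(data):
--         if c == '.':
--             continue
--
--         if last is not None and last != c:
--             id_ = n
--
--         if id_ not in idx:
--             idx[id_] = []
--
--         idx[id_].append(c)
--         last = c
--
--     return idx
-- ===== SOURCE B (Python) =====
-- def extract_index(data):
--     items = [(n, c) for n, c in enumerate(data) if c != '.']
--     idx = {}
--     first = True
--     while items:
--         n, c = items[0]
--         run = 1
--         while run < len(items) and items[run][1] == c: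
--             run += 1
--         idx[0 if first else n] = [c] * run
--         first = False
--         items = items[run:]
--     return idx
-- ===== Notes on version B (the rewrite author's own statement) =====
-- stated objective: alternative
-- what changed: Replaced A's single-pass state machine (running last-char/group-id variables with membership tests into a growing dict) by a filter-then-group decomposition: first keep the enumerated non-dot entries, then cut that list into maximal same-char runs, emitting each run at once as key -> [char]*runlength (first run keyed 0 as in A).
import Mathlib
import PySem

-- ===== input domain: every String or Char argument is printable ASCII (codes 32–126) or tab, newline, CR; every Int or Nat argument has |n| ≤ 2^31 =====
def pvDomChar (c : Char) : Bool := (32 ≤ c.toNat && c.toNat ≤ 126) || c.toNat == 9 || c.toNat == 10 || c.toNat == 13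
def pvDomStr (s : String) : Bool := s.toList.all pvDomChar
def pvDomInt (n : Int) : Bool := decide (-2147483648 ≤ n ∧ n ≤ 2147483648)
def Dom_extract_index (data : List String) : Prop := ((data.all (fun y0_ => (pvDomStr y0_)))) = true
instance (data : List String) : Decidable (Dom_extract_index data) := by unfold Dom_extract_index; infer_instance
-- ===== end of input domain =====

-- B replaces A's running-state loop by filter-then-group into maximal same-char runs (alternative decomposition; return-value equivalence).


-- ===== PORT A =====
-- the 'for n, c in enumerate(data)' loop of A, carrying (idx, id_, last) as loop state
def eiLoop : List String → Int → PySem.Dict Int (List String) → Int → Option String → PySem.Dict Int (List String)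
  | [], _, idx, _, _ => idx
  | c :: rest, n, idx, id_, last =>
    if c == "." then eiLoop rest (n + 1) idx id_ last
    else
      let id2 : Int := if (match last with | some l => l != c | none => false) then n else id_
      let idx1 := if idx.contains id2 then idx else idx.insert id2 []
      let idx2 := idx1.modify id2 [] (fun l => l ++ [c])
      eiLoop rest (n + 1) idx2 id2 (some c)

def extract_index (data : List String) : List (Int × List String) :=
  (eiLoop data 0 PySem.Dict.empty 0 none).items

-- ===== PORT B =====
-- cut the filtered enumerated list into maximal same-char runs ('while items:' of Source B);
-- 'first' says whether we are on the first run (keyed 0)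
def eiSpans : List (Int × String) → Bool → List (Int × List String)
  | [], _ => []
  | (n, c) :: rest, first =>
    let run := (rest.takeWhile (fun p => p.2 == c)).length + 1
    ((if first then 0 else n), List.replicate run c) ::
      eiSpans (rest.dropWhile (fun p => p.2 == c)) false
termination_by l _ => l.length
decreasing_by
  simp only [List.length_cons]
  exact Nat.lt_succ_of_le (List.length_dropWhile_le _ _)

def extract_index_alt (data : List String) : List (Int × List String) :=
  eiSpans ((PySem.List.enumerate data 0).filter (fun p => p.2 != ".")) true

-- ===== PRECONDITION & SPEC =====
def Spec_extract_index (data : List String) (out : List (Int × List String)) : Prop := out = extract_index_alt data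
instance (data : List String) (out : List (Int × List String)) : Decidable (Spec_extract_index data out) := by unfold Spec_extract_index; infer_instance

-- ===== CLAIM (what is proved, stated in full; the proofs are below) =====
def Claim_equal_extract_index : Prop := ∀ (data : List String), Dom_extract_index data → Spec_extract_index data (extract_index data)

-- ===== LEMMAS AND PROOFS =====

-- 'eiMerge k m c gs': prepend a pending run of m copies of c keyed k onto the span list gs,
-- fusing with gs's head group when that group also consists of c's
def eiMerge (k : Int) (m : Nat) (c : String) : List (Int × List String) → List (Int × List String)
  | [] => [(k, List.replicate m c)]
  | (n', cs) :: t =>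
    if cs.head? == some c then (k, List.replicate m c ++ cs) :: t
    else (k, List.replicate m c) :: (n', cs) :: t

lemma eiMerge_spans (k : Int) (m : Nat) (c : String) (F : List (Int × String)) :
    eiMerge k (m + 1) c (eiSpans F false)
      = (k, List.replicate (m + 1 + (F.takeWhile (fun p => p.2 == c)).length) c)
          :: eiSpans (F.dropWhile (fun p => p.2 == c)) false := by
  match F with
  | [] => simp [eiSpans, eiMerge]
  | (n2, c2) :: F2 =>
    by_cases h : c2 = c
    · subst h
      rw [eiSpans]
      simp [eiMerge, List.head?_replicate]
      try simp [← List.replicate_add]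
      try ring_nf
    · rw [eiSpans]
      simp [eiMerge, List.head?_replicate, eiSpans, h]
      try ring_nf

-- Dict-level facts about the shapes A's loop state takes
lemma contains_append_last (acc : List (Int × List String)) (k : Int) (v : List String) :
    (PySem.Dict.mk (acc ++ [(k, v)])).contains k = true := by
  simp [PySem.Dict.contains]

lemma contains_fresh (acc : List (Int × List String)) (k : Int) (v : List String) (n : Int)
    (hacc : ∀ p ∈ acc, p.1 < n) (hk : k < n) :
    (PySem.Dict.mk (acc ++ [(k, v)])).contains n = false := by
  simp only [PySem.Dict.contains, List.any_eq_false]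
  rintro ⟨a, b⟩ hab
  simp only [List.mem_append, List.mem_singleton] at hab
  rcases hab with h | h
  · have := hacc _ h; simp_all; omega
  · simp_all; omega

lemma modify_append_last (acc : List (Int × List String)) (k : Int) (v : List String)
    (c : String) (hacc : ∀ p ∈ acc, p.1 ≠ k) :
    (PySem.Dict.mk (acc ++ [(k, v)])).modify k [] (fun l => l ++ [c])
      = PySem.Dict.mk (acc ++ [(k, v ++ [c])]) := by
  have hc : (PySem.Dict.mk (acc ++ [(k, v)])).contains k = true := contains_append_last acc k v
  have hfind : (acc ++ [(k, v)]).find? (fun p => p.1 == k) = some (k, v) := by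
    rw [List.find?_append]
    have : acc.find? (fun p => p.1 == k) = none := by
      rw [List.find?_eq_none]
      rintro ⟨a, b⟩ hab
      simpa using hacc _ hab
    simp [this]
  simp only [PySem.Dict.modify, PySem.Dict.getD, PySem.Dict.get?, hfind,
    Option.map_some, Option.getD_some, PySem.Dict.insert, hc, if_pos]
  congr 1
  rw [List.map_append]
  congr 1
  · have h1 : List.map (fun p => if (p.1 == k) = true then (k, v ++ [c]) else p) acc
        = List.map (fun p => p) acc :=
      List.map_congr_left (by rintro ⟨a, b⟩ hab; simpa using fun h => absurd h (hacc _ hab))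
    simpa using h1
  · simp

theorem eiLoop_go (data : List String) : ∀ (n : Int) (acc : List (Int × List String))
    (k : Int) (m : Nat) (c : String),
    (∀ p ∈ acc, p.1 < n) → k < n → (∀ p ∈ acc, p.1 ≠ k) → c ≠ "." →
    (eiLoop data n (PySem.Dict.mk (acc ++ [(k, List.replicate (m + 1) c)])) k (some c)).items
      = acc ++ eiMerge k (m + 1) c
          (eiSpans ((PySem.List.enumerate data n).filter (fun p => p.2 != ".")) false) := by
  induction data with
  | nil => intro n acc k m c _ _ _ _; simp [eiLoop, eiMerge, eiSpans, PySem.List.enumerate]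
  | cons d rest ih =>
    intro n acc k m c hacc hk hne hcdot
    rw [PySem.List.enumerate_cons]
    by_cases hd : d = "."
    · subst hd
      rw [eiLoop]
      simp only [beq_self_eq_true, if_pos, List.filter_cons, bne_self_eq_false,
        Bool.false_eq_true, if_false]
      have := ih (n + 1) acc k m c (fun p hp => by have := hacc p hp; omega) (by omega) hne hcdot
      rw [this]
    · have hdb : (d == ".") = false := by simp [hd]
      rw [eiLoop, List.filter_cons_of_pos (by simp [hd])]
      simp only [hdb, Bool.false_eq_true, if_false]
      by_cases hdc : d = c
      · -- same char: run continues, the last dict entry is extended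
        subst hdc
        simp only [bne_self_eq_false, Bool.false_eq_true, if_false]
        rw [contains_append_last, if_pos rfl, modify_append_last acc k _ d hne,
          ← List.replicate_succ']
        have := ih (n + 1) acc k (m + 1) d (fun p hp => by have := hacc p hp; omega)
          (by omega) hne hcdot
        rw [this, eiMerge_spans, eiMerge_spans]
        simp only [List.takeWhile_cons, List.dropWhile_cons, beq_self_eq_true, if_pos,
          List.length_cons]
        try ring_nf
      · -- new char: a fresh key n is inserted at the back
        have hbne : (c != d) = true := by simp; exact fun h => hdc h.symm
        simp only [hbne, if_pos]
        rw [contains_fresh acc k _ n hacc hk, if_neg (by simp)]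
        have hins : (PySem.Dict.mk (acc ++ [(k, List.replicate (m + 1) c)])).insert n []
            = PySem.Dict.mk ((acc ++ [(k, List.replicate (m + 1) c)]) ++ [(n, ([] : List String))]) := by
          simp only [PySem.Dict.insert, contains_fresh acc k _ n hacc hk]
          simp
        rw [hins]
        have hside : ∀ p ∈ acc ++ [(k, List.replicate (m + 1) c)], p.1 < n + 1 ∧ p.1 ≠ n := by
          rintro ⟨a, b⟩ hab
          simp only [List.mem_append, List.mem_singleton] at hab
          rcases hab with h | h
          · have := hacc _ h; simp_all; constructor <;> omega
          · simp_all; constructor <;> omega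
        rw [modify_append_last (acc ++ [(k, List.replicate (m + 1) c)]) n [] d
          (fun p hp => (hside p hp).2)]
        have heq : ([] : List String) ++ [d] = List.replicate (0 + 1) d := by simp
        rw [heq]
        have := ih (n + 1) (acc ++ [(k, List.replicate (m + 1) c)]) n 0 d
          (fun p hp => (hside p hp).1) (by omega) (fun p hp => (hside p hp).2) hd
        rw [this, eiMerge_spans, eiSpans]
        simp [eiMerge, List.head?_replicate, hdc]
        try ring_nf

theorem eiLoop_start (data : List String) : ∀ (n : Int), 0 ≤ n →
    (eiLoop data n PySem.Dict.empty 0 none).items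
      = eiSpans ((PySem.List.enumerate data n).filter (fun p => p.2 != ".")) true := by
  induction data with
  | nil => intro n _; simp [eiLoop, eiSpans, PySem.List.enumerate, PySem.Dict.empty]
  | cons d rest ih =>
    intro n hn
    rw [PySem.List.enumerate_cons]
    by_cases hd : d = "."
    · subst hd
      rw [eiLoop]
      simp only [beq_self_eq_true, if_pos, List.filter_cons, bne_self_eq_false,
        Bool.false_eq_true, if_false]
      exact ih (n + 1) (by omega)
    · have hdb : (d == ".") = false := by simp [hd]
      rw [eiLoop, List.filter_cons_of_pos (by simp [hd])]
      simp only [hdb, Bool.false_eq_true, if_false]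
      have hcont : (PySem.Dict.empty : PySem.Dict Int (List String)).contains 0 = false := by
        simp [PySem.Dict.contains, PySem.Dict.empty]
      rw [hcont]
      simp only [Bool.false_eq_true, if_false]
      have hins : (PySem.Dict.empty : PySem.Dict Int (List String)).insert 0 []
          = PySem.Dict.mk [((0 : Int), ([] : List String))] := by
        simp [PySem.Dict.insert, PySem.Dict.empty]
      rw [hins]
      have hmod : (PySem.Dict.mk [((0 : Int), ([] : List String))]).modify 0 [] (fun l => l ++ [d])
          = PySem.Dict.mk (([] : List (Int × List String)) ++ [((0 : Int), List.replicate (0 + 1) d)]) := by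
        have := modify_append_last ([] : List (Int × List String)) 0 [] d (by simp)
        simpa using this
      rw [hmod]
      rw [eiLoop_go rest (n + 1) [] 0 0 d (by simp) (by omega) (by simp) hd]
      rw [eiMerge_spans, eiSpans]
      simp
      try ring_nf

-- ===== VERDICT (by name: the statement is the Claim_ definition above) =====
theorem extract_index_spec : Claim_equal_extract_index := by
  intro data _
  unfold Spec_extract_index extract_index extract_index_alt
  exact eiLoop_start data 0 (by omega)
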